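-- pv_equiv track=rewrite | github.com/Nahaeran/swea-algorithm | 연습문제1_후위_유사_표기법_연습.py | make_postfix
-- ===== SOURCE A (Python) =====
-- def make_postfix(infix):
--     stack = [0] * len(infix)
--     top = -1
--     postfix = ''
--
--     for e in infix:
--         if e not in '+-*/':
--             postfix += e
--         else:
--             top += 1
--             stack[top] = e
--
--     while top != -1:
--         postfix += stack[top]
--         top -= 1
--
--     return postfix
-- ===== SOURCE B (Python) =====
-- def make_postfix(infix):
--     operands = ''.join(c for c in infix if c not in '+-*/')
--     operators = ''.join(c for c in infix if c in '+-*/')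
--     return operands + operators[::-1]
-- ===== Notes on version B (the rewrite author's own statement) =====
-- stated objective: simpler
-- what changed: Replaces the preallocated stack with top-index bookkeeping and the explicit pop loop by two filtering passes (operands kept in order, operators collected) concatenated with the operator string reversed by slicing.
import Mathlib
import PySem

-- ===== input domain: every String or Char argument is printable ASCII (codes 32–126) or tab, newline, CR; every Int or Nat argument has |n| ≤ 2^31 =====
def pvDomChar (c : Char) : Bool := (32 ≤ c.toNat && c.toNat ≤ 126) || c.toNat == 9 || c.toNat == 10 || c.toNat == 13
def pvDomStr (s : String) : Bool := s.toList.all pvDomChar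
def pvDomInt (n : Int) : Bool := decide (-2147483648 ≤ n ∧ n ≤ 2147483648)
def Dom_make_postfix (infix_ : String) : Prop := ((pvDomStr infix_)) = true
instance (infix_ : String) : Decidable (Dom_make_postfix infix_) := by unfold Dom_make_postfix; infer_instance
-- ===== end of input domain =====

-- B replaces A's manual stack + pop loop by two filtering passes plus a reversal (objective: simpler).


-- ===== PORT A =====
-- one loop iteration: `if e not in '+-*/': pfx += e  else: top += 1; stack[top] = e`
def pvStepA (st : List Char × Int × List Char) (e : Char) : List Char × Int × List Char :=
  if !(['+', '-', '*', '/'].contains e) then (st.1, st.2.1, st.2.2 ++ [e])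
  else (st.1.set (st.2.1 + 1).toNat e, st.2.1 + 1, st.2.2)

-- `while top != -1: pfx += stack[top]; top -= 1`, with fuel = top + 1 (top starts ≥ -1 and
-- only decreases to -1); stack[top] read via getD — in every reachable state top < len(stack),
-- so this is exact (Python would only raise out of range, which never happens here).
def pvPopA (stack : List Char) : Nat → List Char → List Char
  | 0, pfx => pfx
  | n + 1, pfx => pvPopA stack n (pfx ++ [stack.getD n '0'])

def make_postfix (infix_ : String) : String :=
  -- stack = [0]*len(infix): the int 0 placeholders are never read, modelled by '0'
  match infix_.toList.foldl pvStepA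
      (List.replicate infix_.toList.length '0', (-1 : Int), ([] : List Char)) with
  | (stack, top, pfx) => String.ofList (pvPopA stack (top + 1).toNat pfx)

-- ===== PORT B =====
def make_postfix_alt (infix_ : String) : String :=
  -- operands + operators[::-1]  ([::-1] is exact list reversal)
  String.ofList (infix_.toList.filter (fun c => !(['+', '-', '*', '/'].contains c)) ++
    (infix_.toList.filter (fun c => ['+', '-', '*', '/'].contains c)).reverse)

-- ===== PRECONDITION & SPEC =====
def Spec_make_postfix (infix_ : String) (out : String) : Prop := out = make_postfix_alt infix_
instance (infix_ : String) (out : String) : Decidable (Spec_make_postfix infix_ out) := by unfold Spec_make_postfix; infer_instance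

-- ===== CLAIM (what is proved, stated in full; the proofs are below) =====
def Claim_equal_make_postfix : Prop := ∀ (infix_ : String), Dom_make_postfix infix_ → Spec_make_postfix infix_ (make_postfix infix_)

-- ===== LEMMAS AND PROOFS =====

-- writing at the seam of an append overwrites the head of the right part
theorem pv_set_append_length (l : List Char) (r : List Char) (a : Char) :
    (l ++ r).set l.length a = l ++ r.set 0 a := by
  induction l with
  | nil => simp
  | cons x xs ih => simp [ih]

-- popping fuel = ops.length from a stack whose first ops.length cells hold ops appends ops.reverse
theorem pv_pop_correct (ops : List Char) : ∀ (rest pfx : List Char),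
    pvPopA (ops ++ rest) ops.length pfx = pfx ++ ops.reverse := by
  induction ops using List.reverseRecOn with
  | nil => intro rest pfx; simp [pvPopA]
  | append_singleton ops' a ih =>
    intro rest pfx
    have hg : ((ops' ++ [a]) ++ rest).getD ops'.length '0' = a := by
      rw [List.append_assoc]
      simp [List.getD]
    have hlen : (ops' ++ [a]).length = ops'.length + 1 := by simp
    rw [hlen]
    show pvPopA ((ops' ++ [a]) ++ rest) (ops'.length + 1) pfx = _
    rw [pvPopA, hg, List.append_assoc]
    rw [ih ([a] ++ rest) (pfx ++ [a])]
    simp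

-- loop invariant of A's for-loop: stack's filled prefix = operators so far, top = its length - 1,
-- pfx = operands so far; enough free cells remain for the operators still to come
theorem pv_fold_inv (cs : List Char) : ∀ (ops rest pfx : List Char),
    (cs.filter (fun c => ['+', '-', '*', '/'].contains c)).length ≤ rest.length →
    ∃ rest',
      cs.foldl pvStepA (ops ++ rest, ((ops.length : Int) - 1), pfx)
        = ((ops ++ cs.filter (fun c => ['+', '-', '*', '/'].contains c)) ++ rest',
           ((ops ++ cs.filter (fun c => ['+', '-', '*', '/'].contains c)).length : Int) - 1,
           pfx ++ cs.filter (fun c => !(['+', '-', '*', '/'].contains c))) := by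
  induction cs with
  | nil => intro ops rest pfx _; exact ⟨rest, by simp⟩
  | cons c cs ih =>
    intro ops rest pfx hle
    by_cases hc : (['+', '-', '*', '/'].contains c) = true
    · -- operator: pushed at index top+1 = ops.length
      have hc' : c = '+' ∨ c = '-' ∨ c = '*' ∨ c = '/' := by simpa using hc
      rw [List.filter_cons, if_pos hc] at hle
      cases rest with
      | nil => simp at hle
      | cons r rest₂ =>
        have htop : (((ops.length : Int) - 1) + 1).toNat = ops.length := by omega
        have hstep : pvStepA (ops ++ r :: rest₂, ((ops.length : Int) - 1), pfx) c
            = ((ops ++ [c]) ++ rest₂, (((ops ++ [c]).length : Int) - 1), pfx) := by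
          simp only [pvStepA, hc, Bool.not_true, Bool.false_eq_true, if_false, htop]
          refine Prod.ext ?_ (Prod.ext ?_ rfl)
          · show (ops ++ r :: rest₂).set ops.length c = (ops ++ [c]) ++ rest₂
            rw [pv_set_append_length]; simp
          · show ((ops.length : Int) - 1) + 1 = ((ops ++ [c]).length : Int) - 1
            simp
        rw [List.foldl_cons, hstep]
        have hle₂ : (cs.filter (fun c => ['+', '-', '*', '/'].contains c)).length ≤ rest₂.length := by
          rw [List.length_cons, List.length_cons] at hle; omega
        obtain ⟨rest', h⟩ := ih (ops ++ [c]) rest₂ pfx hle₂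
        refine ⟨rest', ?_⟩
        rw [h, List.filter_cons, if_pos hc, List.filter_cons,
          if_neg (show ¬((!(['+', '-', '*', '/'].contains c)) = true) by simp; tauto)]
        simp
    · -- operand: appended to pfx
      have hc' : ¬(c = '+' ∨ c = '-' ∨ c = '*' ∨ c = '/') := by simpa using hc
      have hstep : pvStepA (ops ++ rest, ((ops.length : Int) - 1), pfx) c
          = (ops ++ rest, ((ops.length : Int) - 1), pfx ++ [c]) := by
        simp only [pvStepA]
        rw [if_pos]
        simpa using hc
      rw [List.foldl_cons, hstep]
      have hle₂ : (cs.filter (fun c => ['+', '-', '*', '/'].contains c)).length ≤ rest.length := by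
        rw [List.filter_cons, if_neg hc] at hle; exact hle
      obtain ⟨rest', h⟩ := ih ops rest (pfx ++ [c]) hle₂
      refine ⟨rest', ?_⟩
      rw [h, List.filter_cons, if_neg hc, List.filter_cons,
        if_pos (show (!(['+', '-', '*', '/'].contains c)) = true by simp; tauto)]
      simp

-- ===== VERDICT (by name: the statement is the Claim_ definition above) =====
theorem make_postfix_spec : Claim_equal_make_postfix := by
  intro infix_ _
  unfold Spec_make_postfix make_postfix make_postfix_alt
  obtain ⟨rest', h⟩ := pv_fold_inv infix_.toList [] (List.replicate infix_.toList.length '0') []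
    (by simpa using List.length_filter_le _ infix_.toList)
  simp only [List.nil_append, List.length_nil, Nat.cast_zero, zero_sub] at h
  rw [h]
  show String.ofList (pvPopA
      ((infix_.toList.filter (fun c => ['+', '-', '*', '/'].contains c)) ++ rest')
      ((((infix_.toList.filter (fun c => ['+', '-', '*', '/'].contains c)).length : Int) - 1 + 1).toNat)
      (infix_.toList.filter (fun c => !(['+', '-', '*', '/'].contains c)))) = _
  have htop : ((((infix_.toList.filter (fun c => ['+', '-', '*', '/'].contains c)).length : Int) - 1 + 1).toNat)
      = (infix_.toList.filter (fun c => ['+', '-', '*', '/'].contains c)).length := by omega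
  rw [htop, pv_pop_correct]
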